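-- pv_equiv track=rewrite | github.com/dtellz/languagewire-api | server/services/translations.py | jeringonza
-- ===== SOURCE A (Python) =====
-- def jeringonza(text: str) -> str:
--     vowels = "aeiouAEIOU"
--     jeringonza_text = ""
--     for letter in text:
--         if letter in vowels:
--             jeringonza_text += f"{letter}p{letter.lower()}"
--         else:
--             jeringonza_text += letter
--     return jeringonza_text
-- ===== SOURCE B (Python) =====
-- def jeringonza(text: str) -> str:
--     # Staged whole-string passes: one replace per vowel, lowercase first so that
--     # the lowercase vowels inserted by the uppercase passes are never re-scanned.
--     for v in "aeiouAEIOU":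
--         text = text.replace(v, f"{v}p{v.lower()}")
--     return text
-- ===== Notes on version B (the rewrite author's own statement) =====
-- stated objective: faster
-- what changed: Replaces A's single per-character accumulating loop with membership tests by ten staged whole-string str.replace passes (one per vowel, lowercase vowels first so inserted lowercase vowels are never re-scanned); the passes run in C instead of a Python-level character loop.
import Mathlib
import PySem

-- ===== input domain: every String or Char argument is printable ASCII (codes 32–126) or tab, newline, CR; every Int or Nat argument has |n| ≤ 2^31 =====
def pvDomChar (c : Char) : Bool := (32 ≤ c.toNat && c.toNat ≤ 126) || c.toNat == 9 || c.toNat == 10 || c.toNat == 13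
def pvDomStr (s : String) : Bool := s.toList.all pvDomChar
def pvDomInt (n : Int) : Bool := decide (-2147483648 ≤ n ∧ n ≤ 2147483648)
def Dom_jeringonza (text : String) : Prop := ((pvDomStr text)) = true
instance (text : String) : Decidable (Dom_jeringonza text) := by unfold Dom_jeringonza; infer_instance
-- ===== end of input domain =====

-- B replaces A's single accumulating per-character pass by ten staged whole-string
-- str.replace passes, one per vowel, lowercase before uppercase (objective: faster, measured).
-- ===== PORT A =====
-- A: accumulate over the characters; vowels get "<v>p<lower v>" appended, others pass through.
def jeringonza (text : String) : String :=
  let vowels : String := "aeiouAEIOU"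
  text.toList.foldl
    (fun (acc : String) (letter : Char) =>
      if vowels.toList.contains letter then
        acc ++ String.ofList [letter, 'p', PySem.Chars.lowerChar letter]
      else
        acc ++ String.ofList [letter])
    ""

-- ===== PORT B =====
-- B: one text.replace(v, v + 'p' + v.lower()) pass per vowel, staged left to right.
def jeringonza_alt (text : String) : String :=
  "aeiouAEIOU".toList.foldl
    (fun (t : String) (v : Char) =>
      PySem.Str.replace t (String.ofList [v]) (String.ofList [v, 'p', PySem.Chars.lowerChar v]))
    text

-- ===== PRECONDITION & SPEC =====
def Spec_jeringonza (text : String) (out : String) : Prop := out = jeringonza_alt text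
instance (text : String) (out : String) : Decidable (Spec_jeringonza text out) := by unfold Spec_jeringonza; infer_instance

-- ===== CLAIM =====
def Claim_equal_jeringonza : Prop := ∀ (text : String), Dom_jeringonza text → Spec_jeringonza text (jeringonza text)

-- ===== LEMMAS AND PROOFS =====

-- substituting a single character v by a replacement list, as a per-char map
def subChar (v : Char) (new : List Char) (c : Char) : List Char :=
  if c = v then new else [c]

-- replace with a single-character pattern is exactly a flatMap of subChar
theorem replace_go_single (v : Char) (new : List Char) :
    ∀ (fuel : Nat) (l acc : List Char), l.length ≤ fuel →
      PySem.Chars.replace.go [v] new fuel l acc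
        = acc.reverse ++ l.flatMap (subChar v new) := by
  intro fuel
  induction fuel with
  | zero =>
    intro l acc h
    have : l = [] := List.length_eq_zero_iff.mp (Nat.le_zero.mp h)
    subst this
    simp [PySem.Chars.replace.go]
  | succ n ih =>
    intro l acc h
    cases l with
    | nil => simp [PySem.Chars.replace.go]
    | cons c t =>
      simp only [PySem.Chars.replace.go]
      by_cases hc : c = v
      · subst hc
        rw [if_pos (by simp [List.isPrefixOf])]
        rw [ih _ _ (by simpa using Nat.le_of_succ_le_succ h)]
        simp [subChar]
      · rw [if_neg (by simp [List.isPrefixOf]; exact fun hh => hc hh.symm)]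
        rw [ih _ _ (by simpa using Nat.le_of_succ_le_succ h)]
        simp [subChar, hc]

theorem replace_single (v : Char) (new s : List Char) :
    PySem.Chars.replace s [v] new = s.flatMap (subChar v new) := by
  unfold PySem.Chars.replace
  rw [if_neg (by simp)]
  simpa using replace_go_single v new s.length s [] le_rfl

-- the staged passes on lists of chars
def stageFold (L : List Char) (s : List Char) : List Char :=
  L.foldl (fun s v => s.flatMap (subChar v [v, 'p', PySem.Chars.lowerChar v])) s

theorem stageFold_flatMap (L : List Char) (s : List Char) :
    stageFold L s = s.flatMap (fun c => stageFold L [c]) := by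
  induction L generalizing s with
  | nil => simp [stageFold]
  | cons v L ih =>
    have h1 : stageFold (v :: L) s
        = stageFold L (s.flatMap (subChar v [v, 'p', PySem.Chars.lowerChar v])) := rfl
    rw [h1, ih, List.flatMap_assoc]
    congr 1
    funext c
    have h2 : stageFold (v :: L) [c]
        = stageFold L (subChar v [v, 'p', PySem.Chars.lowerChar v] c) := by
      simp [stageFold]
    rw [h2, ih]

-- B's string-level fold computes stageFold on the character list
theorem alt_toList (L : List Char) (t : String) :
    (L.foldl
      (fun (t : String) (v : Char) =>
        PySem.Str.replace t (String.ofList [v]) (String.ofList [v, 'p', PySem.Chars.lowerChar v]))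
      t).toList = stageFold L t.toList := by
  induction L generalizing t with
  | nil => simp [stageFold]
  | cons v L ih =>
    simp only [List.foldl_cons, stageFold] at *
    rw [ih]
    congr 1
    rw [PySem.Str.toList_replace]
    simp [replace_single]

-- per-character value of the ten staged passes
theorem stage_single (c : Char) :
    stageFold "aeiouAEIOU".toList [c]
      = if "aeiouAEIOU".toList.contains c then [c, 'p', PySem.Chars.lowerChar c] else [c] := by
  by_cases h : "aeiouAEIOU".toList.contains c
  · rw [if_pos h]
    have h' : c ∈ (['a','e','i','o','u','A','E','I','O','U'] : List Char) := by
      simpa [List.contains_eq_mem] using h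
    fin_cases h' <;> decide
  · rw [if_neg h]
    have h' : ∀ v ∈ "aeiouAEIOU".toList, c ≠ v := by
      intro v hv hcv
      subst hcv
      exact h (by simpa [List.contains_eq_mem] using hv)
    revert h'
    generalize "aeiouAEIOU".toList = L
    induction L with
    | nil => intro; simp [stageFold]
    | cons v L ih =>
      intro h'
      simp only [stageFold, List.foldl_cons, List.flatMap_cons, List.flatMap_nil,
        List.append_nil] at *
      rw [subChar, if_neg (h' v (by simp))]
      exact ih (fun w hw => h' w (by simp [hw]))

-- A's accumulating fold is the flatMap of the full substitution
theorem jeringonza_foldl (l : List Char) (acc : String) :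
    l.foldl
      (fun (acc : String) (letter : Char) =>
        if "aeiouAEIOU".toList.contains letter then
          acc ++ String.ofList [letter, 'p', PySem.Chars.lowerChar letter]
        else
          acc ++ String.ofList [letter]) acc
    = acc ++ String.ofList (l.flatMap
        (fun c => if "aeiouAEIOU".toList.contains c then [c, 'p', PySem.Chars.lowerChar c] else [c])) := by
  induction l generalizing acc with
  | nil => simp
  | cons c cs ih =>
    simp only [List.foldl_cons, List.flatMap_cons, ih]
    by_cases h : "aeiouAEIOU".toList.contains c
    · rw [if_pos h, if_pos h]
      apply String.toList_injective
      simp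
    · rw [if_neg h, if_neg h]
      apply String.toList_injective
      simp

-- ===== VERDICT =====
theorem jeringonza_spec : Claim_equal_jeringonza := by
  intro text _
  show jeringonza text = jeringonza_alt text
  have hA : jeringonza text = String.ofList (text.toList.flatMap
      (fun c => if "aeiouAEIOU".toList.contains c then [c, 'p', PySem.Chars.lowerChar c] else [c])) := by
    have e : jeringonza text = text.toList.foldl
        (fun (acc : String) (letter : Char) =>
          if "aeiouAEIOU".toList.contains letter then
            acc ++ String.ofList [letter, 'p', PySem.Chars.lowerChar letter]
          else
            acc ++ String.ofList [letter]) "" := rfl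
    rw [e, jeringonza_foldl]
    apply String.toList_injective
    simp
  unfold jeringonza_alt
  apply String.toList_injective
  rw [hA, alt_toList, stageFold_flatMap]
  simp only [String.toList_ofList, stage_single]
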